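-- pv_equiv track=rewrite | github.com/TeseySTD/ProgramAndDataSafety | lab2/affine_decrypt.py | build_substitution_table
-- ===== SOURCE A (Python) =====
-- def mod_inverse(a, m):
--     """
--     Обчислює мультиплікативний обернений елемент для a за модулем m.
--     Якщо оберненого елемента не існує, повертає None.
--     """
--     a = a % m
--     for x in range(1, m):
--         if (a * x) % m == 1:
--             return x
--     return None
--
-- def build_substitution_table(a, b):
--     """
--     Будує таблицю заміни для шифрованого алфавіту.
--     Для кожної літери обчислюється її відповідність після розшифрування.
--     """
--     a_inv = mod_inverse(a, 26)
--     if a_inv is None: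
--         return None
--     table = {}
--     for i in range(26):
--         # Обчислюємо зашифроване значення літери
--         cipher_index = (a * i + b) % 26
--         cipher_char = chr(cipher_index + ord('A'))
--         plain_char = chr(i + ord('A'))
--         table[cipher_char] = plain_char
--     return table
-- ===== SOURCE B (Python) =====
-- def build_substitution_table(a, b):
--     # a is invertible mod 26 iff it is coprime to 26 = 2 * 13
--     if a % 2 == 0 or a % 13 == 0:
--         return None
--     alphabet = 'ABCDEFGHIJKLMNOPQRSTUVWXYZ'
--     a0, b0 = a % 26, b % 26
--     # ciphertext letters for plain A..Z, read off by stride-a0 slicing of the repeated alphabet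
--     cipher = (alphabet * (a0 + 1))[b0::a0][:26]
--     return dict(zip(cipher, alphabet))
-- ===== Notes on version B (the rewrite author's own statement) =====
-- stated objective: idiomatic
-- what changed: B replaces A's linear search for a modular inverse by the closed-form coprimality test (a%2 and a%13, since 26=2*13) and replaces A's per-letter loop of modular arithmetic by whole-alphabet operations: the ciphertext alphabet is read off at once by stride-a slicing of the repeated alphabet string and the table is dict(zip(cipher, alphabet)).
import Mathlib
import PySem

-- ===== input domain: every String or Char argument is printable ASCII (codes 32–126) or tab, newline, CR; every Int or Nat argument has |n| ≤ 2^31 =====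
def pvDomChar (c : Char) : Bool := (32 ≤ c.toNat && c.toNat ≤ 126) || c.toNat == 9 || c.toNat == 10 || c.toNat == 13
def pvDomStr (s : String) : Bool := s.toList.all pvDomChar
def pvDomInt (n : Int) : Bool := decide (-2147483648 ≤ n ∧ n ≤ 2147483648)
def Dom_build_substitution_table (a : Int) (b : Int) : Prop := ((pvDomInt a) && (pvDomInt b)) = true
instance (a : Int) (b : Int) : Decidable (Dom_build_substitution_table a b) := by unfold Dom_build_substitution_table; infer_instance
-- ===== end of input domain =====

-- B drops A's linear inverse search (closed-form coprimality test, 26 = 2*13) and builds the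
-- whole ciphertext alphabet at once by stride slicing of the repeated alphabet, zipped with
-- the plain alphabet — no per-letter modular-arithmetic loop; objective: idiomatic.


-- ===== PORT A =====
def mod_inverse (a : Int) (m : Int) : Option Int :=
  let a' := PySem.Int.mod a m
  (PySem.List.pyRange 1 m 1).find? (fun x => PySem.Int.mod (a' * x) m == 1)

def build_substitution_table (a : Int) (b : Int) : Option (List (String × String)) :=
  match mod_inverse a 26 with
  | none => none
  | some _ =>
    let table : PySem.Dict String String :=
      (PySem.List.pyRange 0 26 1).foldl (fun t i =>
        let cipher_index := PySem.Int.mod (a * i + b) 26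
        t.insert (String.ofList [Char.ofNat (cipher_index + 65).toNat])
                 (String.ofList [Char.ofNat (i + 65).toNat])) PySem.Dict.empty
    some table.items

-- ===== PORT B =====
def build_substitution_table_alt (a : Int) (b : Int) : Option (List (String × String)) :=
  if PySem.Int.mod a 2 == 0 || PySem.Int.mod a 13 == 0 then none
  else
    let alphabet : List Char := "ABCDEFGHIJKLMNOPQRSTUVWXYZ".toList
    let a0 := PySem.Int.mod a 26
    let b0 := PySem.Int.mod b 26
    -- (alphabet * (a0 + 1))[b0::a0]; the step a0 is nonzero here, so slice? returns some
    let cipher : List Char :=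
      (PySem.List.slice? (PySem.List.pyRepeat alphabet (a0 + 1)) (some b0) none a0).getD []
    -- [:26]
    let cipher26 := PySem.List.slice cipher none (some 26)
    -- dict(zip(cipher, alphabet))
    let d : PySem.Dict String String :=
      (cipher26.zip alphabet).foldl
        (fun (t : PySem.Dict String String) p =>
          t.insert (String.ofList [p.1]) (String.ofList [p.2])) PySem.Dict.empty
    some d.items

-- ===== PRECONDITION & SPEC =====
def Spec_build_substitution_table (a : Int) (b : Int) (out : Option (List (String × String))) : Prop := out = build_substitution_table_alt a b
instance (a : Int) (b : Int) (out : Option (List (String × String))) : Decidable (Spec_build_substitution_table a b out) := by unfold Spec_build_substitution_table; infer_instance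

-- ===== CLAIM (what is proved, stated in full; the proofs are below) =====
def Claim_equal_build_substitution_table : Prop := ∀ (a : Int) (b : Int), Dom_build_substitution_table a b → Spec_build_substitution_table a b (build_substitution_table a b)

-- ===== LEMMAS AND PROOFS =====

-- Python's % with a positive modulus is Lean's emod
lemma pymod_pos (x m : Int) (h : 0 < m) : PySem.Int.mod x m = x % m :=
  PySem.Int.mod_eq_emod_of_pos h

-- mod_inverse a 26 only depends on a % 26
lemma mod_inverse_emod (a : Int) : mod_inverse a 26 = mod_inverse (a % 26) 26 := by
  unfold mod_inverse
  rw [pymod_pos a 26 (by norm_num), pymod_pos (a % 26) 26 (by norm_num),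
      Int.emod_emod_of_dvd a (dvd_refl 26)]

-- A's "no inverse" outcome agrees with B's closed-form coprimality test
lemma guard_eq (a : Int) :
    (mod_inverse a 26).isNone = (PySem.Int.mod a 2 == 0 || PySem.Int.mod a 13 == 0) := by
  rw [mod_inverse_emod, pymod_pos a 2 (by norm_num), pymod_pos a 13 (by norm_num),
      ← Int.emod_emod_of_dvd a (show (2:Int) ∣ 26 by norm_num),
      ← Int.emod_emod_of_dvd a (show (13:Int) ∣ 26 by norm_num)]
  have h0 : 0 ≤ a % 26 := Int.emod_nonneg a (by norm_num)
  have h1 : a % 26 < 26 := Int.emod_lt_of_pos a (by norm_num)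
  set r := a % 26 with hr
  interval_cases r <;> decide

-- a pointwise-some filterMap is a map
lemma filterMap_map' {α : Type} (l : List ℕ) (f : ℕ → Option α) (g : ℕ → α)
    (h : ∀ x ∈ l, f x = some (g x)) : l.filterMap f = l.map g := by
  induction l with
  | nil => rfl
  | cons x t ih =>
    simp only [List.filterMap_cons, h x (by simp), List.map_cons]
    rw [ih (fun y hy => h y (by simp [hy]))]

-- indexing into a repeated list wraps modulo its length
lemma rep_get {α : Type} (xs : List α) (m j : Nat) (h : j < m * xs.length) :
    ((List.replicate m xs).flatten)[j]? = xs[j % xs.length]? := by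
  induction m generalizing j with
  | zero => simp at h
  | succ k ih =>
    simp only [List.replicate_succ, List.flatten_cons]
    by_cases hj : j < xs.length
    · rw [List.getElem?_append_left hj, Nat.mod_eq_of_lt hj]
    · rw [Nat.not_lt] at hj
      rw [List.getElem?_append_right hj]
      have hsm : (k + 1) * xs.length = k * xs.length + xs.length := by ring
      have := ih (j - xs.length) (by omega)
      rw [this]
      congr 1
      conv_rhs => rw [show j = xs.length + (j - xs.length) by omega]
      rw [Nat.add_mod_left]

lemma alph_get (r : Nat) (h : r < 26) :
    "ABCDEFGHIJKLMNOPQRSTUVWXYZ".toList[r]? = some (Char.ofNat (r + 65)) := by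
  interval_cases r <;> rfl

lemma alph_eq : "ABCDEFGHIJKLMNOPQRSTUVWXYZ".toList
    = (List.range 26).map (fun k => Char.ofNat (k + 65)) := by decide

-- B's sliced repeated alphabet, cut to 26, is the pointwise affine-encryption image of A..Z
lemma cipher_eq (a0 b0 : Int) (h1 : 1 ≤ a0) (h2 : a0 ≤ 25) (h3 : 0 ≤ b0) (h4 : b0 ≤ 25) :
    PySem.List.slice
      ((PySem.List.slice? (PySem.List.pyRepeat "ABCDEFGHIJKLMNOPQRSTUVWXYZ".toList (a0 + 1))
          (some b0) none a0).getD []) none (some 26)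
    = (List.range 26).map (fun k : Nat => Char.ofNat (((b0 + a0 * (k : Int)) % 26).toNat + 65)) := by
  have hlen : (PySem.List.pyRepeat "ABCDEFGHIJKLMNOPQRSTUVWXYZ".toList (a0 + 1)).length
      = (a0 + 1).toNat * 26 := by
    simp [PySem.List.pyRepeat, List.length_flatten, List.map_replicate, List.sum_replicate]
  set XS := PySem.List.pyRepeat "ABCDEFGHIJKLMNOPQRSTUVWXYZ".toList (a0 + 1) with hXS
  rw [PySem.List.slice?]
  simp only [if_neg (show ¬ a0 = 0 by omega)]
  rw [PySem.List.sliceIndices]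
  have hn : (((a0 + 1).toNat * 26 : Nat) : Int) = 26 * (a0 + 1) := by push_cast; omega
  simp only [if_neg (show ¬ a0 < 0 by omega), hlen, hn,
    if_neg (show ¬ b0 < 0 by omega),
    min_eq_left (show b0 ≤ 26 * (a0 + 1) by omega),
    if_pos (show b0 < 26 * (a0 + 1) by omega),
    if_pos (show (0:Int) < a0 by omega)]
  set c' : Int := (26 * (a0 + 1) - b0 + a0 - 1) / a0 with hc'
  have hdm := Int.mul_ediv_add_emod (26 * (a0 + 1) - b0 + a0 - 1) a0
  have hml := Int.emod_nonneg (26 * (a0 + 1) - b0 + a0 - 1) (show a0 ≠ 0 by omega)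
  have hmu := Int.emod_lt_of_pos (26 * (a0 + 1) - b0 + a0 - 1) (show (0:Int) < a0 by omega)
  have hc26 : 26 ≤ c'.toNat := by
    have h26 : 26 * a0 ≤ a0 * c' := by nlinarith
    nlinarith [Int.toNat_of_nonneg (show (0:Int) ≤ c' by nlinarith), Int.self_le_toNat c']
  simp only [Option.getD_some]
  have hpt : ∀ x ∈ List.range c'.toNat,
      XS[(b0 + a0 * (x : Int)).toNat]?
        = some (Char.ofNat (((b0 + a0 * (x : Int)) % 26).toNat + 65)) := by
    intro x hx
    rw [List.mem_range] at hx
    have hx' : (x : Int) < c' := by omega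
    have hb : (0:Int) ≤ a0 * (x : Int) := by positivity
    have hub : b0 + a0 * (x : Int) < 26 * (a0 + 1) := by nlinarith
    rw [hXS, PySem.List.pyRepeat, rep_get _ _ _ (by simp; omega)]
    have hm : (b0 + a0 * (x : Int)).toNat % "ABCDEFGHIJKLMNOPQRSTUVWXYZ".toList.length
        = ((b0 + a0 * (x : Int)) % 26).toNat := by
      have : "ABCDEFGHIJKLMNOPQRSTUVWXYZ".toList.length = 26 := by decide
      rw [this]; omega
    rw [hm, alph_get _ (by omega)]
  rw [filterMap_map' _ _ _ hpt]
  rw [PySem.List.slice_to _ (by norm_num)]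
  rw [← List.map_take, List.take_range]
  have h26 : min (Int.toNat 26) c'.toNat = 26 := by omega
  rw [h26]

set_option maxHeartbeats 1000000 in
theorem build_substitution_table_spec_aux (a b : Int) :
    build_substitution_table a b = build_substitution_table_alt a b := by
  unfold build_substitution_table build_substitution_table_alt
  have hg := guard_eq a
  cases hmi : mod_inverse a 26 with
  | none =>
    rw [hmi] at hg
    simp only [Option.isNone_none] at hg
    rw [← hg]
    simp
  | some v =>
    rw [hmi] at hg
    simp only [Option.isNone_some] at hg
    rw [← hg]
    simp only [Bool.false_eq_true, if_false]
    have hodd : ¬ (PySem.Int.mod a 2 == 0 || PySem.Int.mod a 13 == 0) = true := by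
      rw [← hg]; simp
    rw [pymod_pos a 2 (by norm_num), pymod_pos a 13 (by norm_num)] at hodd
    simp only [Bool.or_eq_true, beq_iff_eq, not_or] at hodd
    rw [pymod_pos a 26 (by norm_num), pymod_pos b 26 (by norm_num)]
    have ha2 : (a % 26) % 2 = a % 2 := Int.emod_emod_of_dvd a (by norm_num)
    have ha0l : (0:Int) ≤ a % 26 := Int.emod_nonneg a (by norm_num)
    have ha0u : a % 26 < 26 := Int.emod_lt_of_pos a (by norm_num)
    have ha1 : 1 ≤ a % 26 := by
      rcases hodd with ⟨h2, _⟩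
      by_contra h
      have : a % 26 = 0 := by omega
      rw [← ha2, this] at h2
      exact h2 rfl
    have hb0l : (0:Int) ≤ b % 26 := Int.emod_nonneg b (by norm_num)
    have hb0u : b % 26 < 26 := Int.emod_lt_of_pos b (by norm_num)
    rw [cipher_eq (a % 26) (b % 26) ha1 (by omega) hb0l (by omega)]
    have hpr : PySem.List.pyRange 0 26 1 = (List.range 26).map (fun k : Nat => ((0:Int) + (k:Int))) := by
      rw [PySem.List.pyRange_one]; norm_num; rfl
    rw [hpr]
    rw [alph_eq]
    rw [List.zip_map']
    rw [List.foldl_map]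
    rw [List.foldl_map]
    have hfun : (fun (x : PySem.Dict String String) (y : Nat) =>
        x.insert (String.ofList [Char.ofNat (PySem.Int.mod (a * (0 + (y:Int)) + b) 26 + 65).toNat])
          (String.ofList [Char.ofNat ((0:Int) + (y:Int) + 65).toNat]))
      = (fun (x : PySem.Dict String String) (y : Nat) =>
        x.insert (String.ofList [(Char.ofNat (((b % 26 + a % 26 * (y:Int)) % 26).toNat + 65), Char.ofNat (y + 65)).1])
          (String.ofList [(Char.ofNat (((b % 26 + a % 26 * (y:Int)) % 26).toNat + 65), Char.ofNat (y + 65)).2])) := by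
      funext x y
      dsimp only
      have hkey : (PySem.Int.mod (a * (0 + (y:Int)) + b) 26 + 65).toNat
          = ((b % 26 + a % 26 * (y:Int)) % 26).toNat + 65 := by
        rw [pymod_pos _ 26 (by norm_num)]
        have h1 : a % 26 ≡ a [ZMOD 26] := Int.emod_emod_of_dvd a (dvd_refl 26)
        have h2 : b % 26 ≡ b [ZMOD 26] := Int.emod_emod_of_dvd b (dvd_refl 26)
        have hcong : (b % 26 + a % 26 * (y : Int)) % 26 = (a * (0 + (y : Int)) + b) % 26 := by
          calc (b % 26 + a % 26 * (y : Int)) % 26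
              = (b + a * (y : Int)) % 26 := h2.add (h1.mul_right (y : Int))
            _ = (a * (0 + (y : Int)) + b) % 26 := by ring_nf
        have hnn : (0:Int) ≤ (b % 26 + a % 26 * (y : Int)) % 26 := Int.emod_nonneg _ (by norm_num)
        omega
      have hval : ((0:Int) + (y:Int) + 65).toNat = (y : Nat) + 65 := by omega
      rw [hkey, hval]
    rw [hfun]

-- ===== VERDICT (by name: the statement is the Claim_ definition above) =====
theorem build_substitution_table_spec : Claim_equal_build_substitution_table := by
  intro a b _
  exact build_substitution_table_spec_aux a b
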